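-- pv_equiv track=rewrite | github.com/0xStryK3R/Scaler-DSA-Revision | python/Day-44/CW_1.py | solve
-- ===== SOURCE A (Python) =====
-- def solve(A, B):
--     char_freq_map = {}
--     for char in B:
--         char_freq_map.setdefault(char, 0)
--         char_freq_map[char] += 1
--
--     for char, freq in char_freq_map.items():
--         if freq % A != 0:
--             return -1
--
--     return 1
-- ===== SOURCE B (Python) =====
-- def solve(A, B):
--     s = sorted(B)
--     while s:
--         c = s[0]
--         k = 0
--         while k < len(s) and s[k] == c:
--             k += 1
--         if k % A != 0:
--             return -1
--         s = s[k:]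
--     return 1
-- ===== Notes on version B (the rewrite author's own statement) =====
-- stated objective: alternative
-- what changed: Replaces the hash-map frequency count with a sort-then-scan over maximal runs of equal characters: each run length is a character's frequency, checked against A as the scan goes.
import Mathlib
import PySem

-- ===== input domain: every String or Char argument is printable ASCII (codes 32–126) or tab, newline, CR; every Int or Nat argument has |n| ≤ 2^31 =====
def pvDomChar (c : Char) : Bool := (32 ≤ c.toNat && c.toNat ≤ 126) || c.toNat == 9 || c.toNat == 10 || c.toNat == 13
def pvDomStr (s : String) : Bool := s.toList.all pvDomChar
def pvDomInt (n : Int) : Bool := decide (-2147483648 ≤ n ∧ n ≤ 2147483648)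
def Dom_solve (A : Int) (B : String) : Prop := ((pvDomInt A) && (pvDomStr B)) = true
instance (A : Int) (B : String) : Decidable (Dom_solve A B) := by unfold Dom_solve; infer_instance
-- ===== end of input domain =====

-- B replaces A's hash-map frequency count by a sort-then-scan over maximal runs of equal
-- characters (alternative decomposition, same -1/1 results; not claimed faster).


-- ===== PORT A =====
-- the second for-loop of A: the first item with freq % A != 0 returns -1, else 1
def solveLoopA (A : Int) : List (Char × Int) → Int
  | [] => 1
  | (_, freq) :: rest => if PySem.Int.mod freq A ≠ 0 then -1 else solveLoopA A rest

def solve (A : Int) (B : String) : Int :=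
  let char_freq_map := B.toList.foldl (fun d char =>
      -- char_freq_map.setdefault(char, 0); char_freq_map[char] += 1
      let d1 := d.setdefault char 0
      d1.insert char (d1.getD char 0 + 1)) PySem.Dict.empty
  solveLoopA A char_freq_map.items

-- ===== PORT B =====
-- the outer while-loop of Source B: c = s[0]; k = length of the maximal front run of c
-- (the inner 'while k < len(s) and s[k] == c' scan, as a takeWhile); check k % A; s = s[k:]
def altLoop (A : Int) : List Char → Int
  | [] => 1
  | c :: rest =>
    let k := ((c :: rest).takeWhile (fun x => x == c)).length
    if PySem.Int.mod (k : Int) A ≠ 0 then -1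
    else altLoop A ((c :: rest).drop k)
termination_by s => s.length
decreasing_by
  simp only [List.takeWhile_cons, beq_self_eq_true, if_true, List.length_cons, List.drop_succ_cons,
    List.length_drop]
  omega

def solve_alt (A : Int) (B : String) : Int :=
  altLoop A (PySem.List.sorted B.toList (fun x => x) false)

-- ===== PRECONDITION & SPEC =====
-- Pre_ excludes exactly the inputs where the Python A raises ZeroDivisionError:
-- A = 0 with a nonempty string (on the empty string no modulo is ever computed).
def Pre_solve (A : Int) (B : String) : Prop := A ≠ 0 ∨ B = ""
instance (A : Int) (B : String) : Decidable (Pre_solve A B) := by unfold Pre_solve; infer_instance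
def pvWitness_solve : Int × String := (2, "abab")
def Spec_solve (A : Int) (B : String) (out : Int) : Prop := out = solve_alt A B
instance (A : Int) (B : String) (out : Int) : Decidable (Spec_solve A B out) := by unfold Spec_solve; infer_instance

-- ===== CLAIM (what is proved, stated in full; the proofs are below) =====
def Claim_equal_solve : Prop := ∀ (A : Int) (B : String), Dom_solve A B → Pre_solve A B → Spec_solve A B (solve A B)

-- ===== LEMMAS AND PROOFS =====

-- the predicate both loops decide: this character's count in l is not divisible by A
def badP (A : Int) (l : List Char) (c : Char) : Bool := !(PySem.Int.mod (l.count c) A == 0)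

-- one loop body of A (setdefault to 0, then increment) is the counter step
theorem step_eq (d : PySem.Dict Char Int) (c : Char) :
    ((d.setdefault c 0).insert c ((d.setdefault c 0).getD c 0 + 1)) = d.insert c (d.getD c 0 + 1) := by
  by_cases h : (d.items.any fun p => p.1 == c) = true
  · simp [PySem.Dict.setdefault, PySem.Dict.contains, h]
  · have h' : ∀ (x : Int), (c, x) ∉ d.items := by simpa using h
    have hk : ∀ p ∈ d.items, ¬ p.1 = c := by
      intro p hp hc
      exact h' p.2 (by rwa [← hc, Prod.mk.eta])
    have hfind : List.find? (fun p => p.1 == c) d.items = none := by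
      rw [List.find?_eq_none]; intro p hp; simpa using hk p hp
    simp [PySem.Dict.setdefault, PySem.Dict.contains, h, PySem.Dict.insert, PySem.Dict.getD,
      PySem.Dict.get?, hfind]
    conv_rhs => rw [← List.map_id d.items]
    apply List.map_congr_left
    intro p hp
    simp [hk p hp]

theorem solveLoopA_eq (A : Int) (l : List (Char × Int)) :
    solveLoopA A l = if l.any (fun p => !(PySem.Int.mod p.2 A == 0)) then -1 else 1 := by
  induction l with
  | nil => rfl
  | cons p rest ih =>
    obtain ⟨c, freq⟩ := p
    rw [solveLoopA, List.any_cons]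
    by_cases h : PySem.Int.mod freq A = 0
    · rw [if_neg (by simp [h]), ih]
      cases hr : rest.any (fun p => !(PySem.Int.mod p.2 A == 0)) <;> simp [h]
    · rw [if_pos (by simp [h])]
      simp [h]

-- solve A B decides: does some character of B have a count not divisible by A?
theorem solve_eq (A : Int) (B : String) :
    solve A B = if B.toList.any (badP A B.toList) then -1 else 1 := by
  have hfold : (B.toList.foldl (fun d char =>
      let d1 := d.setdefault char 0
      d1.insert char (d1.getD char 0 + 1)) PySem.Dict.empty) = PySem.Dict.counter B.toList := by
    have hfun : (fun (d : PySem.Dict Char Int) char =>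
        let d1 := d.setdefault char 0
        d1.insert char (d1.getD char 0 + 1)) = (fun d char => d.insert char (d.getD char 0 + 1)) := by
      funext d c; exact step_eq d c
    rw [hfun, PySem.Dict.foldl_insert_getD_add_one_eq_counter]
  show solveLoopA A _ = _
  rw [hfold, solveLoopA_eq, PySem.Dict.items_counter]
  have hany : ((PySem.Set.ofList B.toList).map (fun k => (k, (B.toList.count k : Int)))).any
      (fun p => !(PySem.Int.mod p.2 A == 0)) = B.toList.any (badP A B.toList) := by
    rw [Bool.eq_iff_iff]
    simp only [List.any_eq_true, List.mem_map, badP]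
    constructor
    · rintro ⟨p, ⟨c, hc, rfl⟩, hp⟩
      exact ⟨c, (PySem.Set.mem_ofList _ _).mp hc, hp⟩
    · rintro ⟨c, hc, hp⟩
      exact ⟨(c, (B.toList.count c : Int)), ⟨c, (PySem.Set.mem_ofList _ _).mpr hc, rfl⟩, hp⟩
  rw [hany]

-- in a sorted list every character ≥ c, everything left after dropping the run of c differs from c
theorem dropWhile_ne (c : Char) : ∀ (l : List Char), l.Pairwise (· ≤ ·) → (∀ y ∈ l, c ≤ y) →
    ∀ x ∈ l.dropWhile (fun x => x == c), x ≠ c := by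
  intro l
  induction l with
  | nil => intro _ _ x hx; simp at hx
  | cons a t ih =>
    intro hp hle x hx
    by_cases ha : (a == c) = true
    · rw [List.dropWhile_cons, if_pos ha] at hx
      exact ih (List.pairwise_cons.mp hp).2 (fun y hy => hle y (List.mem_cons_of_mem a hy)) x hx
    · rw [List.dropWhile_cons, if_neg ha] at hx
      have hanec : a ≠ c := fun h => ha (by simp [h])
      have hca : c < a := lt_of_le_of_ne (hle a List.mem_cons_self) (Ne.symm hanec)
      rcases List.mem_cons.mp hx with h | h
      · exact h ▸ hanec
      · have hax : a ≤ x := (List.pairwise_cons.mp hp).1 x h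
        have hcx : c < x := lt_of_lt_of_le hca hax
        exact fun hxc => absurd (hxc ▸ hcx) (lt_irrefl c)

-- in a sorted list the front run of the head character contains ALL its occurrences
theorem run_facts (c : Char) (rest : List Char) (hs : (c :: rest).Pairwise (· ≤ ·)) :
    (∀ x ∈ (c :: rest).takeWhile (fun x => x == c), x = c) ∧
    (∀ x ∈ (c :: rest).dropWhile (fun x => x == c), x ≠ c) := by
  constructor
  · intro x hx
    exact eq_of_beq (List.mem_takeWhile_imp (p := fun x => x == c) hx)
  · refine dropWhile_ne c _ hs ?_
    intro y hy
    rcases List.mem_cons.mp hy with h | h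
    · exact le_of_eq h.symm
    · exact (List.pairwise_cons.mp hs).1 y h

-- dropping the length of the takeWhile is the dropWhile (no named library lemma found)
theorem drop_length_takeWhile (p : Char → Bool) (l : List Char) :
    l.drop (l.takeWhile p).length = l.dropWhile p := by
  induction l with
  | nil => rfl
  | cons a t ih => by_cases h : p a <;> simp [h, ih]

theorem altLoop_eq (A : Int) : ∀ (n : Nat) (s : List Char), s.length ≤ n → s.Pairwise (· ≤ ·) →
    altLoop A s = if s.any (badP A s) then -1 else 1 := by
  intro n
  induction n with
  | zero =>
    intro s hn _
    have hnil : s = [] := List.eq_nil_of_length_eq_zero (Nat.le_zero.mp hn)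
    subst hnil; simp [altLoop]
  | succ m ih =>
    intro s hn hs
    match s with
    | [] => simp [altLoop]
    | c :: rest =>
      obtain ⟨htc, hdc⟩ := run_facts c rest hs
      set t := (c :: rest).takeWhile (fun x => x == c) with ht
      set d := (c :: rest).dropWhile (fun x => x == c) with hd
      have hsplit : t ++ d = c :: rest := List.takeWhile_append_dropWhile
      have htcons : c ∈ t := by
        rw [ht, List.takeWhile_cons, if_pos (by simp)]; exact List.mem_cons_self
      have hcount_t : t.count c = t.length := List.count_eq_length.mpr (fun y hy => (htc y hy).symm)
      have hcount_d : d.count c = 0 := List.count_eq_zero.mpr (fun h => hdc c h rfl)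
      have hcount : (c :: rest).count c = t.length := by
        rw [← hsplit, List.count_append, hcount_t, hcount_d]
        exact Nat.add_zero _
      have hcount_rest : ∀ x ∈ d, (c :: rest).count x = d.count x := by
        intro x hx
        have h0 : t.count x = 0 := List.count_eq_zero.mpr (fun h => hdc x hx (htc x h))
        rw [← hsplit, List.count_append, h0, Nat.zero_add]
      have hdrop : (c :: rest).drop t.length = d := drop_length_takeWhile _ _
      have hdsorted : d.Pairwise (· ≤ ·) := hs.sublist (List.dropWhile_sublist _)
      have hdlen : d.length ≤ m := by
        have h1 : t.length + d.length = rest.length + 1 := by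
          rw [← List.length_append, hsplit, List.length_cons]
        have h2 : 1 ≤ t.length := List.length_pos_of_mem htcons
        have h3 := hn
        rw [List.length_cons] at h3
        omega
      have hihd := ih d hdlen hdsorted
      rw [altLoop]
      simp only [← ht, hdrop]
      by_cases hb : PySem.Int.mod (t.length : Int) A = 0
      · rw [if_neg (by simpa using hb), hihd]
        have hcond : (c :: rest).any (badP A (c :: rest)) = d.any (badP A d) := by
          rw [Bool.eq_iff_iff]
          simp only [List.any_eq_true]
          constructor
          · rintro ⟨x, hx, hpx⟩
            rcases List.mem_append.mp (hsplit ▸ hx : x ∈ t ++ d) with h | h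
            · exfalso
              rw [badP, htc x h, hcount, hb] at hpx
              simp at hpx
            · exact ⟨x, h, by rwa [badP, ← hcount_rest x h]⟩
          · rintro ⟨x, hx, hpx⟩
            exact ⟨x, hsplit ▸ List.mem_append.mpr (Or.inr hx), by rwa [badP, hcount_rest x hx]⟩
        rw [hcond]
      · rw [if_pos (by simpa using hb)]
        have hone : (c :: rest).any (badP A (c :: rest)) = true :=
          List.any_eq_true.mpr ⟨c, List.mem_cons_self, by simp [badP, hcount, hb]⟩
        rw [hone]; rfl

theorem solve_alt_eq (A : Int) (B : String) :
    solve_alt A B = if B.toList.any (badP A B.toList) then -1 else 1 := by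
  unfold solve_alt
  have hperm : (PySem.List.sorted B.toList (fun x => x) false).Perm B.toList :=
    PySem.List.sorted_perm _ _ _
  have hpw : (PySem.List.sorted B.toList (fun x => x) false).Pairwise (· ≤ ·) :=
    PySem.List.sorted_pairwise _ _
  rw [altLoop_eq A (PySem.List.sorted B.toList (fun x => x) false).length _ le_rfl hpw]
  have hcond : (PySem.List.sorted B.toList (fun x => x) false).any
      (badP A (PySem.List.sorted B.toList (fun x => x) false)) = B.toList.any (badP A B.toList) := by
    rw [Bool.eq_iff_iff]
    simp only [List.any_eq_true]
    constructor
    · rintro ⟨c, hc, hpc⟩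
      exact ⟨c, hperm.mem_iff.mp hc, by rwa [badP, ← hperm.count_eq]⟩
    · rintro ⟨c, hc, hpc⟩
      exact ⟨c, hperm.mem_iff.mpr hc, by rwa [badP, hperm.count_eq]⟩
  rw [hcond]

-- ===== VERDICT (by name: the statement is the Claim_ definition above) =====
theorem solve_spec : Claim_equal_solve := by
  intro A B _ _
  unfold Spec_solve
  rw [solve_eq, solve_alt_eq]
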